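-- pv_equiv track=rewrite | github.com/6210qwe/leetcode_py | leetcode_solutions/by_id/q3372.py | longest_strictly_increasing_or_decreasing_subarray
-- ===== SOURCE A (Python) =====
-- from typing import List, Optional
--
-- def longest_strictly_increasing_or_decreasing_subarray(nums: List[int]) -> int:
--     """
--     返回数组 nums 中 严格递增 或 严格递减 的最长非空子数组的长度。
--     """
--     if not nums:
--         return 0
--
--     inc_len = 1
--     dec_len = 1
--     max_len = 1
--
--     for i in range(1, len(nums)):
--         if nums[i] > nums[i - 1]:
--             inc_len += 1
--             dec_len = 1
--         elif nums[i] < nums[i - 1]: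
--             dec_len += 1
--             inc_len = 1
--         else:
--             inc_len = 1
--             dec_len = 1
--
--         max_len = max(max_len, inc_len, dec_len)
--
--     return max_len
-- ===== SOURCE B (Python) =====
-- from typing import List, Optional
--
-- def longest_strictly_increasing_or_decreasing_subarray(nums: List[int]) -> int:
--     if not nums:
--         return 0
--     signs = [1 if b > a else (-1 if b < a else 0) for a, b in zip(nums, nums[1:])]
--     best = 0
--     cur = 0
--     prev_sign = 0
--     for s in signs:
--         if s != 0 and s == prev_sign:
--             cur += 1
--         elif s != 0:
--             cur = 1
--         else:
--             cur = 0
--         if cur > best: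
--             best = cur
--         prev_sign = s
--     return best + 1
-- ===== Notes on version B (the rewrite author's own statement) =====
-- stated objective: alternative
-- what changed: Replaces the two interleaved inc/dec counters with a precompute-then-scan decomposition: build the pairwise comparison-sign sequence, then find the longest run of identical nonzero signs and add 1.
import Mathlib
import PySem

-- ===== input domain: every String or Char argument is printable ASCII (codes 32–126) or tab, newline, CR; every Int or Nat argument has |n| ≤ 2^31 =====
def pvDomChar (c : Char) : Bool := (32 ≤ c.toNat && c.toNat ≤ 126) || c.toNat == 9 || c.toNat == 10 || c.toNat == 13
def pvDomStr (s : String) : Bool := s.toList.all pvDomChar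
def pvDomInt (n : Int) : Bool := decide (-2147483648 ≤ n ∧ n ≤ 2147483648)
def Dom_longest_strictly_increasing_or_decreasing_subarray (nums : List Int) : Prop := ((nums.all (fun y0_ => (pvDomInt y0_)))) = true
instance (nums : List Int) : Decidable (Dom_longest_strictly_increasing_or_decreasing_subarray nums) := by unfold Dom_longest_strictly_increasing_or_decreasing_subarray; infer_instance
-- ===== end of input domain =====

-- B replaces A's two interleaved inc/dec counters by a precompute-then-scan decomposition
-- (pairwise comparison signs, then longest run of identical nonzero signs, plus one); objective: alternative.

-- ===== PORT A =====
-- A's loop over i in range(1, len(nums)), carried as recursion over the tail with prev = nums[i-1];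
-- state (inc_len, dec_len, max_len) and branch order exactly as in the Python.
def pvLoopA (prev inc dec mx : Int) : List Int → Int
  | [] => mx
  | x :: xs =>
    if x > prev then
      pvLoopA x (inc + 1) 1 (max (max mx (inc + 1)) 1) xs
    else if x < prev then
      pvLoopA x 1 (dec + 1) (max (max mx 1) (dec + 1)) xs
    else
      pvLoopA x 1 1 (max (max mx 1) 1) xs

def longest_strictly_increasing_or_decreasing_subarray (nums : List Int) : Int :=
  match nums with
  | [] => 0
  | a :: rest => pvLoopA a 1 1 1 rest

-- ===== PORT B =====
-- signs = [1 if b > a else (-1 if b < a else 0) for a, b in zip(nums, nums[1:])]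
def pvSign (a b : Int) : Int := if b > a then 1 else if b < a then -1 else 0

-- B's scan of the sign list with state (prev_sign, cur, best)
def pvLoopB (prevs cur best : Int) : List Int → Int
  | [] => best
  | s :: ss =>
    let cur' := if s ≠ 0 ∧ s = prevs then cur + 1 else if s ≠ 0 then 1 else 0
    pvLoopB s cur' (if cur' > best then cur' else best) ss

def longest_strictly_increasing_or_decreasing_subarray_alt (nums : List Int) : Int :=
  match nums with
  | [] => 0
  | _ :: tl => pvLoopB 0 0 0 (List.zipWith pvSign nums tl) + 1

-- ===== PRECONDITION & SPEC =====
def Spec_longest_strictly_increasing_or_decreasing_subarray (nums : List Int) (out : Int) : Prop := out = longest_strictly_increasing_or_decreasing_subarray_alt nums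
instance (nums : List Int) (out : Int) : Decidable (Spec_longest_strictly_increasing_or_decreasing_subarray nums out) := by unfold Spec_longest_strictly_increasing_or_decreasing_subarray; infer_instance

-- ===== CLAIM (what is proved, stated in full; the proofs are below) =====
def Claim_equal_longest_strictly_increasing_or_decreasing_subarray : Prop := ∀ (nums : List Int), Dom_longest_strictly_increasing_or_decreasing_subarray nums → Spec_longest_strictly_increasing_or_decreasing_subarray nums (longest_strictly_increasing_or_decreasing_subarray nums)

-- ===== LEMMAS AND PROOFS =====

-- the sign list of prev :: xs, seen from the A side
def pvSignsFrom (prev : Int) : List Int → List Int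
  | [] => []
  | x :: xs => pvSign prev x :: pvSignsFrom x xs

lemma pvSignsFrom_eq_zipWith (prev : Int) (xs : List Int) :
    pvSignsFrom prev xs = List.zipWith pvSign (prev :: xs) xs := by
  induction xs generalizing prev with
  | nil => rfl
  | cons x xs ih => simp [pvSignsFrom, ih]

-- coupling invariant between A's counter state and B's run-scan state
lemma pvLoop_key (xs : List Int) : ∀ (prev inc dec mx prevs cur best : Int),
    1 ≤ inc → 1 ≤ dec → 0 ≤ cur → 0 ≤ best →
    (prevs = 1 → inc = cur + 1 ∧ dec = 1) →
    (prevs = -1 → dec = cur + 1 ∧ inc = 1) →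
    (prevs ≠ 1 → prevs ≠ -1 → inc = 1 ∧ dec = 1 ∧ cur = 0) →
    mx = best + 1 →
    pvLoopA prev inc dec mx xs = pvLoopB prevs cur best (pvSignsFrom prev xs) + 1 := by
  induction xs with
  | nil =>
    intro _ _ _ _ _ _ _ _ _ _ _ _ _ _ h
    simpa [pvLoopA, pvLoopB, pvSignsFrom] using h
  | cons x xs ih =>
    intro prev inc dec mx prevs cur best hinc hdec hcur hbest h1 h2 h0 hmx
    simp only [pvLoopA, pvSignsFrom, pvLoopB, pvSign]
    by_cases hgt : x > prev
    · simp only [if_pos hgt]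
      by_cases hp : prevs = 1
      · obtain ⟨hi, -⟩ := h1 hp
        rw [if_pos (⟨one_ne_zero, hp.symm⟩ : (1 : Int) ≠ 0 ∧ (1 : Int) = prevs)]
        apply ih
        · omega
        · omega
        · omega
        · omega
        · intro _; exact ⟨by omega, rfl⟩
        · intro h; exact absurd h (by norm_num)
        · intro h _; exact absurd rfl h
        · omega
      · rw [if_neg (by rintro ⟨-, h⟩; exact hp h.symm),
            if_pos (one_ne_zero : (1 : Int) ≠ 0)]
        have hi1 : inc = 1 := by
          by_cases hq : prevs = -1
          · exact (h2 hq).2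
          · exact (h0 hp hq).1
        apply ih
        · omega
        · omega
        · omega
        · omega
        · intro _; exact ⟨by omega, rfl⟩
        · intro h; exact absurd h (by norm_num)
        · intro h _; exact absurd rfl h
        · omega
    · simp only [if_neg hgt]
      by_cases hlt : x < prev
      · simp only [if_pos hlt]
        by_cases hp : prevs = -1
        · obtain ⟨hd, -⟩ := h2 hp
          rw [if_pos (⟨by norm_num, hp.symm⟩ : (-1 : Int) ≠ 0 ∧ (-1 : Int) = prevs)]
          apply ih
          · omega
          · omega
          · omega
          · omega
          · intro h; exact absurd h (by norm_num)
          · intro _; exact ⟨by omega, rfl⟩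
          · intro _ h; exact absurd rfl h
          · omega
        · rw [if_neg (by rintro ⟨-, h⟩; exact hp h.symm),
              if_pos (show (-1 : Int) ≠ 0 by norm_num)]
          have hd1 : dec = 1 := by
            by_cases hq : prevs = 1
            · exact (h1 hq).2
            · exact (h0 hq hp).2.1
          apply ih
          · omega
          · omega
          · omega
          · omega
          · intro h; exact absurd h (by norm_num)
          · intro _; exact ⟨by omega, rfl⟩
          · intro _ h; exact absurd rfl h
          · omega
      · simp only [if_neg hlt]
        rw [if_neg (by rintro ⟨h, -⟩; exact h rfl),
            if_neg (by simp : ¬ (0 : Int) ≠ 0)]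
        apply ih
        · omega
        · omega
        · omega
        · omega
        · intro h; exact absurd h (by norm_num)
        · intro h; exact absurd h (by norm_num)
        · intro _ _; exact ⟨rfl, rfl, rfl⟩
        · omega

-- ===== VERDICT (by name: the statement is the Claim_ definition above) =====
theorem longest_strictly_increasing_or_decreasing_subarray_spec : Claim_equal_longest_strictly_increasing_or_decreasing_subarray := by
  intro nums _
  unfold Spec_longest_strictly_increasing_or_decreasing_subarray
  cases nums with
  | nil => rfl
  | cons a rest =>
    show pvLoopA a 1 1 1 rest = _
    rw [show longest_strictly_increasing_or_decreasing_subarray_alt (a :: rest)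
        = pvLoopB 0 0 0 (List.zipWith pvSign (a :: rest) rest) + 1 from rfl,
      ← pvSignsFrom_eq_zipWith]
    exact pvLoop_key rest a 1 1 1 0 0 0 le_rfl le_rfl le_rfl le_rfl
      (by norm_num) (by norm_num) (fun _ _ => ⟨rfl, rfl, rfl⟩) rfl
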